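-- pv_equiv track=rewrite | github.com/lyorchids/rookie-nl2sql | graphs/nodes/select_tables.py | parse_table_string_to_array
-- ===== SOURCE A (Python) =====
-- def parse_table_string_to_array(input_string: str) -> list[str]:
--     """
--     解析表格字符串，提取表名数组
--
--     Args:
--         input_string: 格式如 "Invoice: InvoiceId, CustomerId, Total\nCustomer: CustomerId, FirstName, LastName"
--
--     Returns:
--         表名数组，如 ['Invoice', 'Customer', 'InvoiceLine']
--     """
--     if not input_string:
--         return []
--
--     tables = []
--
--     # 按行分割
--     lines = input_string.strip().split('\n')
--
--     for line in lines:
--         line = line.strip()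
--         if not line:
--             continue
--
--         # 查找冒号位置
--         if ':' in line:
--             # 提取冒号前的部分作为表名
--             table_name = line.split(':', 1)[0].strip()
--             if table_name:
--                 tables.append(table_name)
--
--     return tables
-- ===== SOURCE B (Python) =====
-- def parse_table_string_to_array(input_string: str) -> list[str]:
--     # Single-pass character state machine: no intermediate line list, no per-line
--     # split/strip calls; tracks the chars before the first ':' of the current line.
--     tables = []
--     pending = []
--     seen_colon = False
--     for ch in input_string:
--         if ch == '\n':
--             pending = []
--             seen_colon = False
--         elif ch == ':':
--             if not seen_colon:
--                 name = ''.join(pending).strip()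
--                 if name:
--                     tables.append(name)
--                 seen_colon = True
--         elif not seen_colon:
--             pending.append(ch)
--     return tables
-- ===== Notes on version B (the rewrite author's own statement) =====
-- stated objective: alternative
-- what changed: Replaced strip-the-whole-string + split-into-lines + per-line strip/split with a single character-by-character state machine that collects the chars before the first colon of each line and finalizes a name whenever that colon is seen.
import Mathlib
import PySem

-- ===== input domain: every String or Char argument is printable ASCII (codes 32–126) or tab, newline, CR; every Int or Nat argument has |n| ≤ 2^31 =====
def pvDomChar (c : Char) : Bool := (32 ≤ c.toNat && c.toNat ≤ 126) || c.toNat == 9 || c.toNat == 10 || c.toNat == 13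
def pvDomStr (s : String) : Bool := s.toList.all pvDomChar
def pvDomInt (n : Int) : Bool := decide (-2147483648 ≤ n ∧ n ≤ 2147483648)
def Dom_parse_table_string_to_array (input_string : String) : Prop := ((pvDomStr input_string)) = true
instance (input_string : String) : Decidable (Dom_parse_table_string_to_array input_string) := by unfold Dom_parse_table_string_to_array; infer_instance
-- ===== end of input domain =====

-- B replaces strip + split-into-lines + per-line strip/split with a single character-by-character
-- state machine over the input (alternative decomposition, same O(n) cost).


-- ===== PORT A =====
-- A's per-line loop body: strip the line, skip if empty, if ':' occurs take the
-- stripped part before the first ':' and append it when non-empty.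
def pvLineA (tables : List String) (line : List Char) : List String :=
  if PySem.Chars.strip line = [] then tables
  else if PySem.Chars.isIn [':'] (PySem.Chars.strip line) = true then
    if PySem.Chars.strip (PySem.List.pyGetD (PySem.Chars.splitOnMax (PySem.Chars.strip line) [':'] 1) 0 []) ≠ [] then
      tables ++ [String.ofList (PySem.Chars.strip (PySem.List.pyGetD (PySem.Chars.splitOnMax (PySem.Chars.strip line) [':'] 1) 0 []))]
    else tables
  else tables

def parse_table_string_to_array (input_string : String) : List String :=
  if input_string.toList = [] then []
  else
    let lines := PySem.Chars.splitOn (PySem.Chars.strip input_string.toList) ['\n']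
    lines.foldl pvLineA []

-- ===== PORT B =====
-- B's state: (tables so far, chars of the current line before a ':', colon-seen flag).
def pvStepB (st : List String × List Char × Bool) (ch : Char) : List String × List Char × Bool :=
  if ch = '\n' then (st.1, [], false)
  else if ch = ':' then
    if st.2.2 then st
    else
      let name := PySem.Chars.strip st.2.1
      ((if name ≠ [] then st.1 ++ [String.ofList name] else st.1), st.2.1, true)
  else if st.2.2 then st
  else (st.1, st.2.1 ++ [ch], false)

def parse_table_string_to_array_alt (input_string : String) : List String :=
  (input_string.toList.foldl pvStepB ([], [], false)).1

-- ===== PRECONDITION & SPEC =====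
def Spec_parse_table_string_to_array (input_string : String) (out : List String) : Prop := out = parse_table_string_to_array_alt input_string
instance (input_string : String) (out : List String) : Decidable (Spec_parse_table_string_to_array input_string out) := by unfold Spec_parse_table_string_to_array; infer_instance

-- ===== CLAIM (what is proved, stated in full; the proofs are below) =====
def Claim_equal_parse_table_string_to_array : Prop := ∀ (input_string : String), Dom_parse_table_string_to_array input_string → Spec_parse_table_string_to_array input_string (parse_table_string_to_array input_string)

-- ===== LEMMAS AND PROOFS =====

/-- Reference line decomposition: the pieces of a char list between '\n' separators. -/
def pvConsFirst (p : List Char) : List (List Char) → List (List Char)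
  | [] => [p]
  | l :: ls => (p ++ l) :: ls

def pvLines : List Char → List (List Char)
  | [] => [[]]
  | c :: cs => if c = '\n' then [] :: pvLines cs else pvConsFirst [c] (pvLines cs)

theorem pvLines_ne_nil (cs : List Char) : pvLines cs ≠ [] := by
  cases cs with
  | nil => simp [pvLines]
  | cons c cs =>
    simp only [pvLines]
    split
    · simp
    · cases h : pvLines cs <;> simp [pvConsFirst]

theorem pvConsFirst_consFirst (p q : List Char) (ls : List (List Char)) :
    pvConsFirst p (pvConsFirst q ls) = pvConsFirst (p ++ q) ls := by
  cases ls <;> simp [pvConsFirst]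

theorem pv_go_nl (fuel : Nat) : ∀ (l cur : List Char) (acc : List (List Char)),
    l.length ≤ fuel →
    PySem.Chars.splitOn.go ['\n'] fuel l cur acc
      = acc.reverse ++ pvConsFirst cur.reverse (pvLines l) := by
  induction fuel with
  | zero =>
    intro l cur acc h
    have : l = [] := by cases l <;> simp_all
    subst this
    simp [PySem.Chars.splitOn.go, pvLines, pvConsFirst]
  | succ fuel ih =>
    intro l cur acc h
    cases l with
    | nil => simp [PySem.Chars.splitOn.go, pvLines, pvConsFirst]
    | cons c rest =>
      by_cases hc : c = '\n'
      · subst hc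
        have : PySem.Chars.splitOn.go ['\n'] (fuel+1) ('\n' :: rest) cur acc
            = PySem.Chars.splitOn.go ['\n'] fuel rest [] (cur.reverse :: acc) := by
          simp [PySem.Chars.splitOn.go, List.isPrefixOf]
        rw [this, ih rest [] (cur.reverse :: acc) (by simpa using Nat.le_of_succ_le_succ h)]
        cases hr : pvLines rest with
        | nil => exact absurd hr (pvLines_ne_nil rest)
        | cons l ls => simp [pvLines, pvConsFirst, hr]
      · have : PySem.Chars.splitOn.go ['\n'] (fuel+1) (c :: rest) cur acc
            = PySem.Chars.splitOn.go ['\n'] fuel rest (c :: cur) acc := by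
          simp [PySem.Chars.splitOn.go, List.isPrefixOf, Ne.symm hc]
        rw [this, ih rest (c :: cur) acc (by simpa using Nat.le_of_succ_le_succ h)]
        cases hr : pvLines rest <;> simp [pvLines, hc, pvConsFirst, hr]

theorem pv_splitOn_eq_pvLines (cs : List Char) :
    PySem.Chars.splitOn cs ['\n'] = pvLines cs := by
  rw [PySem.Chars.splitOn]
  rw [pv_go_nl (cs.length + 1) cs [] [] (by omega)]
  cases h : pvLines cs with
  | nil => exact absurd h (pvLines_ne_nil cs)
  | cons l ls => simp [pvConsFirst]

theorem pv_goMax_zero (fuel : Nat) (l cur : List Char) (acc : List (List Char)) :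
    PySem.Chars.splitOnMax.go [':'] fuel 0 l cur acc = acc.reverse ++ [cur.reverse ++ l] := by
  cases fuel with
  | zero => simp [PySem.Chars.splitOnMax.go]
  | succ fuel => cases l <;> simp [PySem.Chars.splitOnMax.go]

theorem pv_goMax_one (fuel : Nat) : ∀ (l cur : List Char) (acc : List (List Char)),
    l.length ≤ fuel →
    ∃ xs, PySem.Chars.splitOnMax.go [':'] fuel 1 l cur acc
      = acc.reverse ++ (cur.reverse ++ l.takeWhile (· ≠ ':')) :: xs := by
  induction fuel with
  | zero =>
    intro l cur acc h
    have : l = [] := by cases l <;> simp_all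
    subst this
    exact ⟨[], by simp [PySem.Chars.splitOnMax.go]⟩
  | succ fuel ih =>
    intro l cur acc h
    cases l with
    | nil => exact ⟨[], by simp [PySem.Chars.splitOnMax.go]⟩
    | cons c rest =>
      by_cases hc : c = ':'
      · subst hc
        refine ⟨[rest], ?_⟩
        have : PySem.Chars.splitOnMax.go [':'] (fuel+1) 1 (':' :: rest) cur acc
            = PySem.Chars.splitOnMax.go [':'] fuel 0 rest [] (cur.reverse :: acc) := by
          simp [PySem.Chars.splitOnMax.go, List.isPrefixOf]
        rw [this, pv_goMax_zero]
        simp [List.takeWhile]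
      · have : PySem.Chars.splitOnMax.go [':'] (fuel+1) 1 (c :: rest) cur acc
            = PySem.Chars.splitOnMax.go [':'] fuel 1 rest (c :: cur) acc := by
          simp [PySem.Chars.splitOnMax.go, List.isPrefixOf, Ne.symm hc]
        rw [this]
        obtain ⟨xs, hxs⟩ := ih rest (c :: cur) acc (by simpa using Nat.le_of_succ_le_succ h)
        exact ⟨xs, by rw [hxs]; simp [List.takeWhile, hc]⟩

theorem pv_head_splitOnMax (l : List Char) :
    PySem.List.pyGetD (PySem.Chars.splitOnMax l [':'] 1) 0 [] = l.takeWhile (· ≠ ':') := by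
  rw [PySem.Chars.splitOnMax]
  norm_num
  obtain ⟨xs, hxs⟩ := pv_goMax_one (l.length + 1) l [] [] (by omega)
  rw [hxs]
  simp [PySem.List.pyGetD_zero_cons]

-- whitespace facts
theorem pv_strip_cons_ws (c : Char) (xs : List Char) (h : PySem.Chars.isspace c = true) :
    PySem.Chars.strip (c :: xs) = PySem.Chars.strip xs := by
  simp [PySem.Chars.strip, PySem.Chars.lstrip, List.dropWhile, h]

theorem pv_lstrip_append_cons (xs : List Char) (y : Char) (ys : List Char)
    (h : PySem.Chars.isspace y = false) :
    PySem.Chars.lstrip (xs ++ y :: ys) = PySem.Chars.lstrip xs ++ y :: ys := by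
  induction xs with
  | nil => simp [PySem.Chars.lstrip, List.dropWhile, h]
  | cons x xs ihx =>
    by_cases hx : PySem.Chars.isspace x = true
    · simp [PySem.Chars.lstrip, List.dropWhile, hx] at ihx ⊢; exact ihx
    · simp [PySem.Chars.lstrip, List.dropWhile, hx]

theorem pv_rstrip_append_cons (xs : List Char) (y : Char) (ys : List Char)
    (h : PySem.Chars.isspace y = false) :
    PySem.Chars.rstrip (xs ++ y :: ys) = xs ++ y :: PySem.Chars.rstrip ys := by
  simp only [PySem.Chars.rstrip, List.reverse_append, List.reverse_cons]
  rw [List.append_assoc]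
  rw [show ys.reverse ++ ([y] ++ xs.reverse) = ys.reverse ++ y :: xs.reverse by simp]
  rw [List.dropWhile_append]
  split
  · next hall =>
    have : List.dropWhile PySem.Chars.isspace ys.reverse = [] := List.isEmpty_iff.mp hall
    simp [this, h]
  · next hne =>
    simp

theorem pv_strip_append_colon (xs ys : List Char) :
    PySem.Chars.strip (xs ++ ':' :: ys)
      = PySem.Chars.lstrip xs ++ ':' :: PySem.Chars.rstrip ys := by
  rw [PySem.Chars.strip, pv_lstrip_append_cons xs ':' ys (by decide),
      pv_rstrip_append_cons _ ':' ys (by decide)]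

theorem pv_strip_append_ws (c : Char) (xs : List Char) (h : PySem.Chars.isspace c = true) :
    PySem.Chars.strip (xs ++ [c]) = PySem.Chars.strip xs := by
  simp only [PySem.Chars.strip, PySem.Chars.lstrip, List.dropWhile_append]
  split
  · next hall =>
    have : List.dropWhile PySem.Chars.isspace xs = [] := List.isEmpty_iff.mp hall
    simp [this, PySem.Chars.rstrip, List.dropWhile, h]
  · next hne =>
    simp only [PySem.Chars.rstrip, List.reverse_append, List.reverse_cons]
    simp [h]

theorem pv_mem_strip {a : Char} {xs : List Char} (h : a ∈ PySem.Chars.strip xs) : a ∈ xs := by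
  simp only [PySem.Chars.strip, PySem.Chars.rstrip, PySem.Chars.lstrip] at h
  rw [List.mem_reverse] at h
  have h1 := (List.dropWhile_sublist (p := PySem.Chars.isspace)
      (l := (List.dropWhile PySem.Chars.isspace xs).reverse)).mem h
  rw [List.mem_reverse] at h1
  exact (List.dropWhile_sublist _).mem h1

theorem pv_mem_lstrip {a : Char} {xs : List Char} (h : a ∈ PySem.Chars.lstrip xs) : a ∈ xs :=
  (List.dropWhile_sublist _).mem (by simpa [PySem.Chars.lstrip] using h)

theorem pv_isIn_colon (l : List Char) (h : ':' ∈ l) : PySem.Chars.isIn [':'] l = true := by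
  rw [PySem.Chars.isIn_iff_infix]
  obtain ⟨s, t, rfl⟩ := List.append_of_mem h
  exact ⟨s, t, by simp⟩

theorem pv_lineA_no_colon (acc : List String) (line : List Char) (h : ':' ∉ line) :
    pvLineA acc line = acc := by
  unfold pvLineA
  split
  · rfl
  · next hne =>
    have : PySem.Chars.isIn [':'] (PySem.Chars.strip line) = false := by
      rw [PySem.Chars.isIn_eq_false_iff]
      rintro ⟨s, t, hst⟩
      exact h (pv_mem_strip (a := ':') (by rw [← hst]; simp))
    simp [this]

theorem pv_lineA_congr (a : List String) (l1 l2 : List Char)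
    (h : PySem.Chars.strip l1 = PySem.Chars.strip l2) : pvLineA a l1 = pvLineA a l2 := by
  unfold pvLineA; rw [h]

theorem pv_lstrip_idem (xs : List Char) :
    PySem.Chars.strip (PySem.Chars.lstrip xs) = PySem.Chars.strip xs := by
  simp [PySem.Chars.strip, PySem.Chars.lstrip, List.dropWhile_idempotent]

theorem pv_lineA_colon (acc : List String) (pend h : List Char) (hp : ':' ∉ pend) :
    pvLineA acc (pend ++ ':' :: h)
      = if PySem.Chars.strip pend ≠ [] then acc ++ [String.ofList (PySem.Chars.strip pend)] else acc := by
  unfold pvLineA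
  rw [pv_strip_append_colon]
  have hmem : ':' ∈ PySem.Chars.lstrip pend ++ ':' :: PySem.Chars.rstrip h := by simp
  have hnil : PySem.Chars.lstrip pend ++ ':' :: PySem.Chars.rstrip h ≠ [] := by simp
  rw [if_neg hnil, if_pos (pv_isIn_colon _ hmem)]
  rw [pv_head_splitOnMax]
  have htake : (PySem.Chars.lstrip pend ++ ':' :: PySem.Chars.rstrip h).takeWhile (· ≠ ':')
      = PySem.Chars.lstrip pend := by
    rw [List.takeWhile_append_of_pos]
    · simp [List.takeWhile]
    · intro a ha
      simp only [decide_eq_true_eq, ne_eq]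
      intro hcol; subst hcol; exact hp (pv_mem_lstrip ha)
  rw [htake, pv_lstrip_idem]

-- pvLines under a snoc
theorem pv_pvLines_snoc_nl (cs : List Char) : pvLines (cs ++ ['\n']) = pvLines cs ++ [[]] := by
  induction cs with
  | nil => simp [pvLines]
  | cons c cs ih =>
    by_cases hc : c = '\n'
    · subst hc; simp [pvLines, ih]
    · simp only [List.cons_append, pvLines, if_neg hc, ih]
      cases h : pvLines cs with
      | nil => exact absurd h (pvLines_ne_nil cs)
      | cons l ls => simp [pvConsFirst]

theorem pv_pvLines_snoc_ne (c : Char) (hc : c ≠ '\n') : ∀ cs : List Char,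
    ∃ init last, pvLines cs = init ++ [last] ∧ pvLines (cs ++ [c]) = init ++ [last ++ [c]] := by
  intro cs
  induction cs with
  | nil => exact ⟨[], [], by simp [pvLines], by simp [pvLines, hc, pvConsFirst]⟩
  | cons d cs ih =>
    obtain ⟨init, last, h1, h2⟩ := ih
    by_cases hd : d = '\n'
    · subst hd
      exact ⟨[] :: init, last, by simp [pvLines, h1], by simp [pvLines, h2]⟩
    · cases init with
      | nil =>
        refine ⟨[], d :: last, ?_, ?_⟩
        · simp only [pvLines, if_neg hd, h1]; simp [pvConsFirst]
        · simp only [List.cons_append, pvLines, if_neg hd, h2]; simp [pvConsFirst]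
      | cons i0 init' =>
        refine ⟨(d :: i0) :: init', last, ?_, ?_⟩
        · simp only [pvLines, if_neg hd, h1]; simp [pvConsFirst]
        · simp only [List.cons_append, pvLines, if_neg hd, h2]; simp [pvConsFirst]

theorem pv_rstrip_snoc_ws (xs : List Char) (c : Char) (h : PySem.Chars.isspace c = true) :
    PySem.Chars.rstrip (xs ++ [c]) = PySem.Chars.rstrip xs := by
  simp [PySem.Chars.rstrip, h]

theorem pv_rstrip_snoc_nws (xs : List Char) (c : Char) (h : PySem.Chars.isspace c = false) :
    PySem.Chars.rstrip (xs ++ [c]) = xs ++ [c] := by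
  simp [PySem.Chars.rstrip, h]

theorem pv_foldA_snoc_ws (a : List String) (cs : List Char) (c : Char)
    (h : PySem.Chars.isspace c = true) :
    List.foldl pvLineA a (pvLines (cs ++ [c])) = List.foldl pvLineA a (pvLines cs) := by
  by_cases hc : c = '\n'
  · subst hc
    rw [pv_pvLines_snoc_nl]
    rw [List.foldl_append]
    simp [pv_lineA_no_colon _ [] (by simp)]
  · obtain ⟨init, last, h1, h2⟩ := pv_pvLines_snoc_ne c hc cs
    rw [h1, h2, List.foldl_append, List.foldl_append]
    simp only [List.foldl_cons, List.foldl_nil]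
    exact pv_lineA_congr _ _ _ (pv_strip_append_ws c last h)

theorem pv_foldA_rstrip (a : List String) (cs : List Char) :
    List.foldl pvLineA a (pvLines (PySem.Chars.rstrip cs)) = List.foldl pvLineA a (pvLines cs) := by
  induction cs using List.reverseRecOn with
  | nil => simp [PySem.Chars.rstrip]
  | append_singleton xs c ih =>
    by_cases h : PySem.Chars.isspace c = true
    · rw [pv_rstrip_snoc_ws xs c h, ih, pv_foldA_snoc_ws a xs c h]
    · rw [pv_rstrip_snoc_nws xs c (by simpa using h)]

theorem pv_foldA_lstrip (a : List String) (cs : List Char) :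
    List.foldl pvLineA a (pvLines (PySem.Chars.lstrip cs)) = List.foldl pvLineA a (pvLines cs) := by
  induction cs with
  | nil => simp [PySem.Chars.lstrip]
  | cons c cs ih =>
    by_cases h : PySem.Chars.isspace c = true
    · rw [show PySem.Chars.lstrip (c :: cs) = PySem.Chars.lstrip cs by
        simp [PySem.Chars.lstrip, List.dropWhile, h], ih]
      by_cases hc : c = '\n'
      · subst hc
        simp [pvLines, pv_lineA_no_colon _ [] (by simp)]
      · simp only [pvLines, if_neg hc]
        cases hcs : pvLines cs with
        | nil => exact absurd hcs (pvLines_ne_nil cs)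
        | cons l ls =>
          simp only [pvConsFirst, List.foldl_cons]
          congr 1
          exact pv_lineA_congr a _ _ (by simpa using (pv_strip_cons_ws c l h).symm)
    · simp [PySem.Chars.lstrip, List.dropWhile, h]

theorem pv_foldA_strip (a : List String) (cs : List Char) :
    List.foldl pvLineA a (pvLines (PySem.Chars.strip cs)) = List.foldl pvLineA a (pvLines cs) := by
  rw [PySem.Chars.strip, pv_foldA_rstrip, pv_foldA_lstrip]

-- the joint state-machine / per-line correspondence
theorem pv_main (cs : List Char) :
    (∀ (acc : List String) (pend : List Char),
      (List.foldl pvStepB (acc, pend, true) cs).1 = List.foldl pvLineA acc (pvLines cs).tail)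
    ∧ (∀ (acc : List String) (pend : List Char), ':' ∉ pend → '\n' ∉ pend →
      (List.foldl pvStepB (acc, pend, false) cs).1
        = List.foldl pvLineA acc (pvConsFirst pend (pvLines cs))) := by
  induction cs with
  | nil =>
    constructor
    · intro acc pend; simp [pvLines]
    · intro acc pend hp _
      simp only [List.foldl_nil, pvLines, pvConsFirst, List.append_nil]
      simp [pv_lineA_no_colon acc pend hp]
  | cons c cs ih =>
    obtain ⟨ihT, ihF⟩ := ih
    constructor
    · intro acc pend
      by_cases hc : c = '\n'
      · subst hc
        rw [List.foldl_cons, show pvStepB (acc, pend, true) '\n' = (acc, [], false) by simp [pvStepB]]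
        rw [ihF acc [] (by simp) (by simp)]
        simp only [pvLines]
        cases h : pvLines cs with
        | nil => exact absurd h (pvLines_ne_nil cs)
        | cons l ls => simp [pvConsFirst]
      · have hstep : pvStepB (acc, pend, true) c = (acc, pend, true) := by
          by_cases h2 : c = ':' <;> simp [pvStepB, hc, h2]
        simp only [List.foldl_cons, hstep, ihT acc pend]
        by_cases h2 : c = ':'
        · subst h2
          simp only [pvLines, if_neg hc]
          cases h : pvLines cs with
          | nil => exact absurd h (pvLines_ne_nil cs)
          | cons l ls => simp [pvConsFirst]
        · simp only [pvLines, if_neg hc]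
          cases h : pvLines cs with
          | nil => exact absurd h (pvLines_ne_nil cs)
          | cons l ls => simp [pvConsFirst]
    · intro acc pend hp hn
      by_cases hc : c = '\n'
      · subst hc
        rw [List.foldl_cons, show pvStepB (acc, pend, false) '\n' = (acc, [], false) by simp [pvStepB]]
        rw [ihF acc [] (by simp) (by simp)]
        simp only [pvLines]
        cases h : pvLines cs with
        | nil => exact absurd h (pvLines_ne_nil cs)
        | cons l ls =>
          simp [pvConsFirst, pv_lineA_no_colon acc pend hp]
      · by_cases h2 : c = ':'
        · subst h2
          have hstep : pvStepB (acc, pend, false) ':'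
              = ((if PySem.Chars.strip pend ≠ [] then acc ++ [String.ofList (PySem.Chars.strip pend)] else acc), pend, true) := by
            simp [pvStepB]
          simp only [List.foldl_cons, hstep]
          rw [ihT _ pend]
          simp only [pvLines, if_neg hc]
          cases h : pvLines cs with
          | nil => exact absurd h (pvLines_ne_nil cs)
          | cons l ls =>
            simp only [pvConsFirst, List.tail_cons, List.foldl_cons]
            rw [show pend ++ ([':'] ++ l) = pend ++ ':' :: l from rfl, pv_lineA_colon acc pend l hp]
        · have hstep : pvStepB (acc, pend, false) c = (acc, pend ++ [c], false) := by
            simp [pvStepB, hc, h2]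
          simp only [List.foldl_cons, hstep]
          rw [ihF acc (pend ++ [c]) (by simp [hp, Ne.symm h2]) (by simp [hn, Ne.symm hc])]
          rw [show pvLines (c :: cs) = pvConsFirst [c] (pvLines cs) by simp [pvLines, hc]]
          rw [pvConsFirst_consFirst]

theorem pv_B_eq (s : String) :
    parse_table_string_to_array_alt s = List.foldl pvLineA [] (pvLines s.toList) := by
  unfold parse_table_string_to_array_alt
  rw [(pv_main s.toList).2 [] [] (by simp) (by simp)]
  cases h : pvLines s.toList with
  | nil => exact absurd h (pvLines_ne_nil _)
  | cons l ls => simp [pvConsFirst]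

theorem pv_A_eq (s : String) :
    parse_table_string_to_array s = List.foldl pvLineA [] (pvLines s.toList) := by
  unfold parse_table_string_to_array
  by_cases h : s.toList = []
  · rw [if_pos h, h]
    simp [pvLines, pv_lineA_no_colon _ [] (by simp)]
  · rw [if_neg h, pv_splitOn_eq_pvLines, pv_foldA_strip]

-- ===== VERDICT (by name: the statement is the Claim_ definition above) =====
theorem parse_table_string_to_array_spec : Claim_equal_parse_table_string_to_array := by
  intro s _
  unfold Spec_parse_table_string_to_array
  rw [pv_A_eq, pv_B_eq]
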